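-- pv_equiv track=rewrite | github.com/TenzinPlatter/scripts | dotfile_watcher.py | _create_fallback_commit_message
-- ===== SOURCE A (Python) =====
-- def _create_fallback_commit_message(changes, location):
--     """Fallback commit message creation using file system events"""
--     if len(changes) == 1:
--         change = changes[0]
--         return f"{change['event_type']} {change['file_name']} in {location}"
--
--     # Group changes by type
--     created_files = [c['file_name'] for c in changes if c['event_type'] == 'created']
--     modified_files = [c['file_name'] for c in changes if c['event_type'] == 'modified']
--     deleted_files = [c['file_name'] for c in changes if c['event_type'] == 'deleted']
--
--     message_parts = []
--
--     if created_files: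
--         if len(created_files) == 1:
--             message_parts.append(f"add {created_files[0]}")
--         else:
--             message_parts.append(f"add {len(created_files)} files")
--
--     if modified_files:
--         if len(modified_files) == 1:
--             message_parts.append(f"update {modified_files[0]}")
--         else:
--             message_parts.append(f"update {len(modified_files)} files")
--
--     if deleted_files:
--         if len(deleted_files) == 1:
--             message_parts.append(f"remove {deleted_files[0]}")
--         else:
--             message_parts.append(f"remove {len(deleted_files)} files")
--
--     return f"{', '.join(message_parts)} in {location}"
-- ===== SOURCE B (Python) =====
-- def _create_fallback_commit_message(changes, location):
--     if len(changes) == 1: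
--         change = changes[0]
--         return f"{change['event_type']} {change['file_name']} in {location}"
--
--     # Single pass keeping only a counter and the first file name per event type;
--     # no per-type file lists are ever built.
--     cc = mc = dc = 0
--     cn = mn = dn = ""
--     for c in changes:
--         ev = c['event_type']
--         if ev == 'created':
--             cc += 1
--             if cc == 1:
--                 cn = c['file_name']
--         elif ev == 'modified':
--             mc += 1
--             if mc == 1:
--                 mn = c['file_name']
--         elif ev == 'deleted':
--             dc += 1
--             if dc == 1:
--                 dn = c['file_name']
--
--     parts = [f"{verb} {name}" if n == 1 else f"{verb} {n} files"
--              for verb, n, name in (('add', cc, cn), ('update', mc, mn), ('remove', dc, dn))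
--              if n]
--     return f"{', '.join(parts)} in {location}"
-- ===== Notes on version B (the rewrite author's own statement) =====
-- stated objective: alternative
-- what changed: B never materialises per-type file lists: one pass maintains just a counter and the first-seen file name for each of the three event types (six scalars, O(1) extra space), and the message is formatted from those scalars via a comprehension over a fixed (verb,count,name) table.
import Mathlib
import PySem

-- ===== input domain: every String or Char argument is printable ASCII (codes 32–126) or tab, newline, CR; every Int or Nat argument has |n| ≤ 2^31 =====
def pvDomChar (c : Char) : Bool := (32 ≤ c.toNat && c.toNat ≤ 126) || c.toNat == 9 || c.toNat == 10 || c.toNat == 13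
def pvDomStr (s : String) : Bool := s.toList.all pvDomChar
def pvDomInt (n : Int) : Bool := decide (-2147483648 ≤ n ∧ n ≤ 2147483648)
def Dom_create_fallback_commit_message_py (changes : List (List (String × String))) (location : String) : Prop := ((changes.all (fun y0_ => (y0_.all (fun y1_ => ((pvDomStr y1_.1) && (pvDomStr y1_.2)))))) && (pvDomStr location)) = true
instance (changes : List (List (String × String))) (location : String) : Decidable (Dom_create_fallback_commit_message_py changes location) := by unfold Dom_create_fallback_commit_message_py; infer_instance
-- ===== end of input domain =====

-- B replaces A's three per-type file lists by a single pass that keeps only a counter and the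
-- first-seen file name per event type (alternative decomposition; return value only).

-- shared helper: Python `c['k']` on a dict argument (assoc list, first match); none = KeyError
def pvLook (c : List (String × String)) (k : String) : Option String :=
  PySem.Dict.get? (PySem.Dict.mk c) k

-- ===== PORT A =====
def create_fallback_commit_message_py (changes : List (List (String × String))) (location : String) : String :=
  if changes.length = 1 then
    let change := changes.headD []
    ((pvLook change "event_type").getD "") ++ " " ++ ((pvLook change "file_name").getD "") ++ " in " ++ location
  else
    let created_files := (changes.filter (fun c => (pvLook c "event_type").getD "" == "created")).map (fun c => (pvLook c "file_name").getD "")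
    let modified_files := (changes.filter (fun c => (pvLook c "event_type").getD "" == "modified")).map (fun c => (pvLook c "file_name").getD "")
    let deleted_files := (changes.filter (fun c => (pvLook c "event_type").getD "" == "deleted")).map (fun c => (pvLook c "file_name").getD "")
    let message_parts : List String := []
    let message_parts := if created_files ≠ [] then
        message_parts ++ [if created_files.length = 1 then "add " ++ created_files.headD ""
                          else "add " ++ PySem.Int.toStr (created_files.length : Int) ++ " files"]
      else message_parts
    let message_parts := if modified_files ≠ [] then
        message_parts ++ [if modified_files.length = 1 then "update " ++ modified_files.headD ""
                          else "update " ++ PySem.Int.toStr (modified_files.length : Int) ++ " files"]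
      else message_parts
    let message_parts := if deleted_files ≠ [] then
        message_parts ++ [if deleted_files.length = 1 then "remove " ++ deleted_files.headD ""
                          else "remove " ++ PySem.Int.toStr (deleted_files.length : Int) ++ " files"]
      else message_parts
    PySem.Str.join ", " message_parts ++ " in " ++ location

-- ===== PORT B =====
-- one loop step of Source B: update (count, first-name) for the matching event type
def pvCountStep (st : (Nat × String) × (Nat × String) × (Nat × String))
    (c : List (String × String)) : (Nat × String) × (Nat × String) × (Nat × String) :=
  let ev := (pvLook c "event_type").getD ""
  if ev == "created" then
    let cc := st.1.1 + 1
    ((cc, if cc = 1 then (pvLook c "file_name").getD "" else st.1.2), st.2)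
  else if ev == "modified" then
    let mc := st.2.1.1 + 1
    (st.1, (mc, if mc = 1 then (pvLook c "file_name").getD "" else st.2.1.2), st.2.2)
  else if ev == "deleted" then
    let dc := st.2.2.1 + 1
    (st.1, st.2.1, (dc, if dc = 1 then (pvLook c "file_name").getD "" else st.2.2.2))
  else st

def create_fallback_commit_message_py_alt (changes : List (List (String × String))) (location : String) : String :=
  if changes.length = 1 then
    let change := changes.headD []
    ((pvLook change "event_type").getD "") ++ " " ++ ((pvLook change "file_name").getD "") ++ " in " ++ location
  else
    let st := changes.foldl pvCountStep ((0, ""), (0, ""), (0, ""))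
    let parts := (([("add", st.1.1, st.1.2), ("update", st.2.1.1, st.2.1.2),
                    ("remove", st.2.2.1, st.2.2.2)] : List (String × Nat × String)).filter
        (fun t => t.2.1 != 0)).map
      (fun t => if t.2.1 = 1 then t.1 ++ " " ++ t.2.2
                else t.1 ++ " " ++ PySem.Int.toStr (t.2.1 : Int) ++ " files")
    PySem.Str.join ", " parts ++ " in " ++ location

-- ===== PRECONDITION & SPEC =====
-- Pre_ excludes exactly the inputs where Python A raises KeyError: a single change missing
-- 'event_type' or 'file_name', or in the multi-change case a change missing 'event_type',
-- or missing 'file_name' while its event type is one of the three grouped ones.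
def Pre_create_fallback_commit_message_py (changes : List (List (String × String))) (location : String) : Prop :=
  if changes.length = 1 then
    (pvLook (changes.headD []) "event_type").isSome = true ∧ (pvLook (changes.headD []) "file_name").isSome = true
  else ∀ c ∈ changes, (pvLook c "event_type").isSome = true ∧
      (((pvLook c "event_type").getD "" = "created" ∨ (pvLook c "event_type").getD "" = "modified" ∨
        (pvLook c "event_type").getD "" = "deleted") → (pvLook c "file_name").isSome = true)
instance (changes : List (List (String × String))) (location : String) : Decidable (Pre_create_fallback_commit_message_py changes location) := by unfold Pre_create_fallback_commit_message_py; infer_instance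

def pvWitness_create_fallback_commit_message_py : (List (List (String × String))) × String :=
  ([[("event_type", "created"), ("file_name", "a.txt")],
    [("event_type", "deleted"), ("file_name", "b.txt")],
    [("event_type", "deleted"), ("file_name", "c.txt")]], "dotfiles")

def Spec_create_fallback_commit_message_py (changes : List (List (String × String))) (location : String) (out : String) : Prop := out = create_fallback_commit_message_py_alt changes location
instance (changes : List (List (String × String))) (location : String) (out : String) : Decidable (Spec_create_fallback_commit_message_py changes location out) := by unfold Spec_create_fallback_commit_message_py; infer_instance

-- ===== CLAIM (what is proved, stated in full; the proofs are below) =====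
def Claim_equal_create_fallback_commit_message_py : Prop := ∀ (changes : List (List (String × String))) (location : String), Dom_create_fallback_commit_message_py changes location → Pre_create_fallback_commit_message_py changes location → Spec_create_fallback_commit_message_py changes location (create_fallback_commit_message_py changes location)

-- ===== LEMMAS AND PROOFS =====

-- the filtered file-name list A builds for event type k
def pvSel (k : String) (l : List (List (String × String))) : List String :=
  (l.filter (fun c => (pvLook c "event_type").getD "" == k)).map (fun c => (pvLook c "file_name").getD "")

-- "first-seen name" update rule agrees with head-of-filtered-list
theorem pv_name_if (a₁ : Nat) (fn a₂ : String) (S : List String) :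
    (if a₁ + 1 = 0 then ((fn :: S).headD (if a₁ + 1 = 1 then fn else a₂))
     else (if a₁ + 1 = 1 then fn else a₂))
      = (if a₁ = 0 then (fn :: S).headD a₂ else a₂) := by
  by_cases h : a₁ = 0
  · simp [h]
  · have h1 : a₁ + 1 ≠ 1 := by omega
    simp [h]

-- invariant of Source B's single pass: each component is (length, head-or-default) of A's list
theorem pv_fold_invariant :
    ∀ (l : List (List (String × String))) (a₁ : Nat) (a₂ : String) (b₁ : Nat) (b₂ : String)
      (c₁ : Nat) (c₂ : String),
      l.foldl pvCountStep ((a₁, a₂), (b₁, b₂), (c₁, c₂))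
        = ((a₁ + (pvSel "created" l).length, if a₁ = 0 then (pvSel "created" l).headD a₂ else a₂),
           (b₁ + (pvSel "modified" l).length, if b₁ = 0 then (pvSel "modified" l).headD b₂ else b₂),
           (c₁ + (pvSel "deleted" l).length, if c₁ = 0 then (pvSel "deleted" l).headD c₂ else c₂)) := by
  intro l
  induction l with
  | nil => intro a₁ a₂ b₁ b₂ c₁ c₂; simp [pvSel]
  | cons c cs ih =>
    intro a₁ a₂ b₁ b₂ c₁ c₂
    simp only [List.foldl_cons]
    by_cases h1 : ((pvLook c "event_type").getD "" == "created") = true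
    · have heq : (pvLook c "event_type").getD "" = "created" := by simpa using h1
      have hstep : pvCountStep ((a₁, a₂), (b₁, b₂), (c₁, c₂)) c
          = ((a₁ + 1, if a₁ + 1 = 1 then (pvLook c "file_name").getD "" else a₂), (b₁, b₂), (c₁, c₂)) := by
        simp [pvCountStep, h1]
      rw [hstep, ih]
      simp only [pvSel, List.filter_cons, heq]
      simp only [Prod.mk.injEq]
      refine ⟨⟨by simp; omega, ?_⟩, ⟨by simp, by simp⟩, by simp, by simp⟩
      exact pv_name_if a₁ ((pvLook c "file_name").getD "") a₂
        ((List.filter (fun c => (pvLook c "event_type").getD "" == "created") cs).map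
          (fun c => (pvLook c "file_name").getD ""))
    · by_cases h2 : ((pvLook c "event_type").getD "" == "modified") = true
      · have heq : (pvLook c "event_type").getD "" = "modified" := by simpa using h2
        have hstep : pvCountStep ((a₁, a₂), (b₁, b₂), (c₁, c₂)) c
            = ((a₁, a₂), (b₁ + 1, if b₁ + 1 = 1 then (pvLook c "file_name").getD "" else b₂), (c₁, c₂)) := by
          simp [pvCountStep, h1, h2]
        rw [hstep, ih]
        simp only [pvSel, List.filter_cons, heq]
        simp only [Prod.mk.injEq]
        refine ⟨⟨by simp, by simp⟩, ⟨by simp; omega, ?_⟩, by simp, by simp⟩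
        exact pv_name_if b₁ ((pvLook c "file_name").getD "") b₂
          ((List.filter (fun c => (pvLook c "event_type").getD "" == "modified") cs).map
            (fun c => (pvLook c "file_name").getD ""))
      · by_cases h3 : ((pvLook c "event_type").getD "" == "deleted") = true
        · have heq : (pvLook c "event_type").getD "" = "deleted" := by simpa using h3
          have hstep : pvCountStep ((a₁, a₂), (b₁, b₂), (c₁, c₂)) c
              = ((a₁, a₂), (b₁, b₂), (c₁ + 1, if c₁ + 1 = 1 then (pvLook c "file_name").getD "" else c₂)) := by
            simp [pvCountStep, h1, h2, h3]
          rw [hstep, ih]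
          simp only [pvSel, List.filter_cons, heq]
          simp only [Prod.mk.injEq]
          refine ⟨⟨by simp, by simp⟩, ⟨by simp, by simp⟩, by simp; omega, ?_⟩
          exact pv_name_if c₁ ((pvLook c "file_name").getD "") c₂
            ((List.filter (fun c => (pvLook c "event_type").getD "" == "deleted") cs).map
              (fun c => (pvLook c "file_name").getD ""))
        · have hstep : pvCountStep ((a₁, a₂), (b₁, b₂), (c₁, c₂)) c = ((a₁, a₂), (b₁, b₂), (c₁, c₂)) := by
            simp [pvCountStep, h1, h2, h3]
          rw [hstep, ih]
          simp only [pvSel, List.filter_cons, h1, h2, h3]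
          simp

-- A's sequential appending and B's filter/map over the fixed (verb,count,name) table build
-- the same parts list, for any three lists
theorem pv_parts_eq (L1 L2 L3 : List String) (loc : String) :
    (let m : List String := []
     let m := if L1 ≠ [] then m ++ [if L1.length = 1 then "add " ++ L1.headD ""
                                    else "add " ++ PySem.Int.toStr (L1.length : Int) ++ " files"] else m
     let m := if L2 ≠ [] then m ++ [if L2.length = 1 then "update " ++ L2.headD ""
                                    else "update " ++ PySem.Int.toStr (L2.length : Int) ++ " files"] else m
     let m := if L3 ≠ [] then m ++ [if L3.length = 1 then "remove " ++ L3.headD ""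
                                    else "remove " ++ PySem.Int.toStr (L3.length : Int) ++ " files"] else m
     PySem.Str.join ", " m ++ " in " ++ loc)
      = (let parts := (([("add", L1.length, L1.headD ""), ("update", L2.length, L2.headD ""),
                         ("remove", L3.length, L3.headD "")] : List (String × Nat × String)).filter
            (fun t => t.2.1 != 0)).map
          (fun t => if t.2.1 = 1 then t.1 ++ " " ++ t.2.2
                    else t.1 ++ " " ++ PySem.Int.toStr (t.2.1 : Int) ++ " files")
         PySem.Str.join ", " parts ++ " in " ++ loc) := by
  cases L1 <;> cases L2 <;> cases L3 <;>
    simp [List.filter,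
      show ("add" : String) ++ " " = "add " from rfl,
      show ("update" : String) ++ " " = "update " from rfl,
      show ("remove" : String) ++ " " = "remove " from rfl]

-- ===== VERDICT (by name: the statement is the Claim_ definition above) =====
theorem create_fallback_commit_message_py_spec : Claim_equal_create_fallback_commit_message_py := by
  intro changes location _ _
  unfold Spec_create_fallback_commit_message_py
  unfold create_fallback_commit_message_py create_fallback_commit_message_py_alt
  by_cases h : changes.length = 1
  · simp only [h, if_true]
  · simp only [h, if_false]
    rw [pv_fold_invariant changes 0 "" 0 "" 0 ""]
    simp only [Nat.zero_add]
    exact pv_parts_eq (pvSel "created" changes) (pvSel "modified" changes)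
      (pvSel "deleted" changes) location
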